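-- pv_equiv track=rewrite | github.com/zdawz/advent-of-code | 2024/02/solution.py | safe_report
-- ===== SOURCE A (Python) =====
-- def safe_report(r):
--     increasing = r[0] < r[1]
--     for i in range(0, len(r) - 1):
--         num1 = r[i]
--         num2 = r[i + 1]
--         if not safe_nums(num1, num2, increasing):
--             return False
--     return True
--
-- def safe_nums(num1, num2, increasing):
--     if num1 == num2:
--         return False
--     elif increasing and num1 > num2:
--         return False
--     elif not increasing and num1 < num2:
--         return False
--     elif abs(num1 - num2) > 3:
--         return False
--     else:
--         return True
-- ===== SOURCE B (Python) =====
-- def safe_report(r):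
--     # Orient the report by its first pair, then judge it globally:
--     # safe iff it is its own sort (monotone non-decreasing), duplicate-free
--     # (strictly monotone), and its largest adjacent gap is at most 3.
--     s = r if r[0] < r[1] else list(reversed(r))
--     if s != sorted(s):
--         return False
--     if len(set(s)) != len(s):
--         return False
--     return max(b - a for a, b in zip(s, s[1:])) <= 3
-- ===== Notes on version B (the rewrite author's own statement) =====
-- stated objective: alternative
-- what changed: B replaces A's stateful index loop with per-pair helper calls and early returns by a global sort-based characterisation: orient the report by its first pair (reversing if needed), then test it equals its own sorted copy, is duplicate-free via set(), and its maximum adjacent gap is at most 3.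
import Mathlib
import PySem

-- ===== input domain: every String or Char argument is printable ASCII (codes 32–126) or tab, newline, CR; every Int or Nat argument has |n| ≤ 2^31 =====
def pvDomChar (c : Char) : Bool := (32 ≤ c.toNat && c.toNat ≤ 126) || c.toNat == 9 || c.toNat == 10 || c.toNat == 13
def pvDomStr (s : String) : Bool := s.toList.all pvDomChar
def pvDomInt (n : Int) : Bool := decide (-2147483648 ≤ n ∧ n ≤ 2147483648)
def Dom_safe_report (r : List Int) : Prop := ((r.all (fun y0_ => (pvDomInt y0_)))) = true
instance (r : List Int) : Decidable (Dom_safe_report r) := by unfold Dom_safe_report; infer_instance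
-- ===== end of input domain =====

-- B replaces A's stateful index loop (per-pair helper calls with early return) by a global,
-- sort-based characterisation: orient the report by its first pair, then it is safe iff it
-- equals its own sort, is duplicate-free, and its largest adjacent gap is ≤ 3 (objective: alternative).

-- ===== PORT A =====
def safe_nums (num1 num2 : Int) (increasing : Bool) : Bool :=
  if num1 == num2 then false
  else if increasing && decide (num1 > num2) then false
  else if !increasing && decide (num1 < num2) then false
  else if decide (3 < |num1 - num2|) then false
  else true

def safe_report (r : List Int) : Bool :=
  let increasing := decide (PySem.List.pyGetD r 0 0 < PySem.List.pyGetD r 1 0)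
  (PySem.List.pyRange 0 ((r.length : Int) - 1) 1).all (fun i =>
    safe_nums (PySem.List.pyGetD r i 0) (PySem.List.pyGetD r (i + 1) 0) increasing)

-- ===== PORT B =====
-- Python's max(...) raises ValueError on an empty report of gaps; that happens only when
-- len(r) < 2, where Python already raised at r[0]/r[1] — outside Pre_; 'false' there is arbitrary.
def safe_report_alt (r : List Int) : Bool :=
  let s := if PySem.List.pyGetD r 0 0 < PySem.List.pyGetD r 1 0 then r else r.reverse
  if s ≠ PySem.List.sorted s (fun x => x) then false
  else if (PySem.Set.ofList s).length ≠ s.length then false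
  else
    (PySem.List.max? ((s.zip (PySem.List.slice s (some 1) none)).map (fun p => p.2 - p.1))
      (fun x => x)).elim false (fun m => decide (m ≤ 3))

-- ===== PRECONDITION & SPEC =====
-- A raises IndexError reading r[0]/r[1] when the report has fewer than 2 levels.
def Pre_safe_report (r : List Int) : Prop := 2 ≤ r.length
instance (r : List Int) : Decidable (Pre_safe_report r) := by unfold Pre_safe_report; infer_instance
def pvWitness_safe_report : List Int := [1, 2, 4]

def Spec_safe_report (r : List Int) (out : Bool) : Prop := out = safe_report_alt r
instance (r : List Int) (out : Bool) : Decidable (Spec_safe_report r out) := by unfold Spec_safe_report; infer_instance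

-- ===== CLAIM (what is proved, stated in full; the proofs are below) =====
def Claim_equal_safe_report : Prop := ∀ (r : List Int), Dom_safe_report r → Pre_safe_report r → Spec_safe_report r (safe_report r)

-- ===== LEMMAS AND PROOFS =====

-- A's index loop over range(0, len-1), viewed at adjacent pairs, equals a scan of zip r (tail r).
theorem pyRange_pairs_all (xs : List Int) (f : Int → Int → Bool) :
    ((PySem.List.pyRange 0 ((xs.length : Int) - 1) 1).all
      (fun i => f (PySem.List.pyGetD xs i 0) (PySem.List.pyGetD xs (i + 1) 0)))
    = (xs.zip xs.tail).all (fun p => f p.1 p.2) := by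
  rw [Bool.eq_iff_iff]
  simp only [List.all_eq_true, PySem.List.mem_pyRange_one]
  constructor
  · intro h p hp
    rcases List.mem_iff_getElem.mp hp with ⟨k, hk, hpk⟩
    have hlen : k < xs.length - 1 := by
      have := hk
      simp [List.length_zip] at this
      omega
    have := h k ⟨by omega, by omega⟩
    rw [PySem.List.pyGetD_eq_getElem xs 0 (by omega) (by omega)] at this
    rw [show ((k : Int) + 1) = ((k + 1 : Nat) : Int) by push_cast; ring] at this
    rw [PySem.List.pyGetD_eq_getElem xs 0 (by omega) (by omega)] at this
    have hget : p = (xs[k]'(by omega), xs[k + 1]'(by omega)) := by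
      rw [← hpk]
      rw [List.getElem_zip]
      congr 1
      rw [List.getElem_tail]
    rw [hget]
    simpa using this
  · intro h i ⟨hi0, hi1⟩
    have hk1 : i.toNat < xs.length - 1 := by omega
    rw [PySem.List.pyGetD_eq_getElem xs 0 hi0 (by omega)]
    rw [PySem.List.pyGetD_eq_getElem xs 0 (by omega) (by omega)]
    have hmem : (xs[i.toNat]'(by omega), xs[(i + 1).toNat]'(by omega)) ∈ xs.zip xs.tail := by
      apply List.mem_iff_getElem.mpr
      refine ⟨i.toNat, by simp [List.length_zip]; omega, ?_⟩
      rw [List.getElem_zip]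
      congr 1
      rw [List.getElem_tail]
      congr 1
      omega
    simpa using h _ hmem

-- adjacent-pair quantification is exactly List.IsChain
theorem isChain_iff_zip {α : Type} (R : α → α → Prop) :
    ∀ s : List α, List.IsChain R s ↔ ∀ p ∈ s.zip s.tail, R p.1 p.2
  | [] => by simp
  | [a] => by simp
  | a :: b :: t => by
    rw [List.isChain_cons_cons]
    simp only [List.tail_cons, List.zip_cons_cons, List.mem_cons, forall_eq_or_imp]
    exact and_congr Iff.rfl (isChain_iff_zip R (b :: t))

-- set(s) is the subsequence of first occurrences of s
theorem foldl_add_sublist {α : Type} [BEq α] :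
    ∀ (xs acc : List α), List.Sublist (xs.foldl PySem.Set.add acc) (acc ++ xs)
  | [], acc => by simp
  | x :: xs, acc => by
    refine (foldl_add_sublist xs (PySem.Set.add acc x)).trans ?_
    unfold PySem.Set.add
    split
    · exact ((List.append_sublist_append_left acc).mpr (List.sublist_cons_self x xs))
    · simp

theorem ofList_length_eq_iff_nodup (s : List Int) :
    (PySem.Set.ofList s).length = s.length ↔ s.Nodup := by
  constructor
  · intro h
    have hsub : List.Sublist (PySem.Set.ofList s) s := by
      have := foldl_add_sublist s ([] : List Int)
      simpa [PySem.Set.ofList_eq_foldl] using this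
    have := hsub.eq_of_length h
    rw [← this]
    exact PySem.Set.nodup_ofList s
  · intro h
    rw [PySem.Set.ofList_eq_self_of_nodup s h]

theorem safe_nums_true_iff (a b : Int) :
    safe_nums a b true = true ↔ a < b ∧ b - a ≤ 3 := by
  unfold safe_nums
  split_ifs with h1 h2 h3 <;> simp_all [lt_abs] <;> omega

theorem safe_nums_false_iff (a b : Int) :
    safe_nums a b false = true ↔ b < a ∧ a - b ≤ 3 := by
  unfold safe_nums
  split_ifs with h1 h2 h3 <;> simp_all [lt_abs] <;> omega

-- B's three global checks on the oriented list characterise the strict-chain-with-bounded-gaps property.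
theorem alt_char (s : List Int) (h2 : 2 ≤ s.length) :
    ((if s ≠ PySem.List.sorted s (fun x => x) then false
      else if (PySem.Set.ofList s).length ≠ s.length then false
      else
        (PySem.List.max? ((s.zip (PySem.List.slice s (some 1) none)).map (fun p => p.2 - p.1))
          (fun x => x)).elim false (fun m => decide (m ≤ 3))) = true)
    ↔ List.IsChain (fun a b : Int => a < b ∧ b - a ≤ 3) s := by
  rw [PySem.List.slice_from_one]
  have hlt_of_chain : List.IsChain (fun a b : Int => a < b ∧ b - a ≤ 3) s →
      s.Pairwise (· < ·) := by
    intro h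
    exact List.isChain_iff_pairwise.mp (h.imp (fun _ _ hab => hab.1))
  split_ifs with hs hn
  · simp only [false_iff]
    intro h
    exact hs (PySem.List.sorted_eq_self_of_pairwise s (fun x => x)
      ((hlt_of_chain h).imp le_of_lt)).symm
  · simp only [false_iff]
    intro h
    exact hn ((ofList_length_eq_iff_nodup s).mpr ((hlt_of_chain h).imp ne_of_lt))
  · replace hs : s = PySem.List.sorted s (fun x => x) := not_not.mp hs
    replace hn : (PySem.Set.ofList s).length = s.length := not_not.mp hn
    have hpw : s.Pairwise (· ≤ ·) := by
      have := PySem.List.sorted_pairwise s (fun x => x)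
      rwa [← hs] at this
    have hnd : s.Nodup := (ofList_length_eq_iff_nodup s).mp hn
    have hlt : s.Pairwise (· < ·) :=
      (hpw.and hnd).imp (fun ⟨hle, hne⟩ => lt_of_le_of_ne hle hne)
    have hchain : ∀ p ∈ s.zip s.tail, p.1 < p.2 :=
      (isChain_iff_zip _ s).mp (List.isChain_iff_pairwise.mpr hlt)
    have hne : (s.zip s.tail).map (fun p => p.2 - p.1) ≠ [] := by
      intro hnil
      have := congrArg List.length hnil
      simp [List.length_zip] at this
      omega
    rw [isChain_iff_zip]
    cases hm : PySem.List.max? ((s.zip s.tail).map (fun p => p.2 - p.1)) (fun x => x) with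
    | none => exact absurd ((PySem.List.max?_eq_none_iff _ _).mp hm) hne
    | some m =>
      simp only [Option.elim_some, decide_eq_true_eq]
      constructor
      · intro hle p hp
        refine ⟨hchain p hp, ?_⟩
        have : p.2 - p.1 ≤ m := PySem.List.max?_isMax hm _ (List.mem_map_of_mem hp)
        omega
      · intro h
        have hmem := PySem.List.max?_mem hm
        rcases List.mem_map.mp hmem with ⟨p, hp, hpm⟩
        have := (h p hp).2
        omega

-- ===== VERDICT (by name: the statement is the Claim_ definition above) =====
theorem safe_report_spec : Claim_equal_safe_report := by
  intro r _ hpre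
  unfold Spec_safe_report
  by_cases hdir : PySem.List.pyGetD r 0 0 < PySem.List.pyGetD r 1 0
  · simp only [safe_report, safe_report_alt, hdir, decide_true, if_true]
    rw [Bool.eq_iff_iff, pyRange_pairs_all r (fun a b => safe_nums a b true), List.all_eq_true, alt_char r hpre, isChain_iff_zip]
    exact forall₂_congr (fun p _ => safe_nums_true_iff p.1 p.2)
  · simp only [safe_report, safe_report_alt, hdir, decide_false, if_false]
    rw [Bool.eq_iff_iff, pyRange_pairs_all r (fun a b => safe_nums a b false), List.all_eq_true,
      alt_char r.reverse (by simpa using hpre), List.isChain_reverse, isChain_iff_zip]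
    exact forall₂_congr (fun p _ => safe_nums_false_iff p.1 p.2)
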